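-- pv_equiv track=rewrite | github.com/HYEONAH-SONG/Algorithms | 프로그래머스/DFS,BFS/Code_Test.py | git_card
-- ===== SOURCE A (Python) =====
-- def git_card(gift_cards, wants):
--     dic = {}
--     result = len(wants)
--     for thing in wants:
--         if thing not in dic:
--             dic[thing] = 1
--         else :
--             dic[thing]= dic[thing] +1
--     for key in gift_cards:
--         if key in dic.keys() and dic[key] > 0:
--             dic[key] -= 1
--             result -=1
--         else:
--             continue
--     return result
-- ===== SOURCE B (Python) =====
-- def git_card(gift_cards, wants):
--     # Count both sides as multisets; covered = sum of per-type minima (multiset intersection).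
--     need = {}
--     for w in wants:
--         need[w] = need.get(w, 0) + 1
--     have = {}
--     for g in gift_cards:
--         have[g] = have.get(g, 0) + 1
--     covered = sum(min(c, have.get(k, 0)) for k, c in need.items())
--     return len(wants) - covered
-- ===== Notes on version B (the rewrite author's own statement) =====
-- stated objective: idiomatic
-- what changed: Replaces A's per-card greedy decrement loop (mutable dict of remaining needs plus a running result) with a multiset-intersection formulation: count both lists once and sum min(need[k], have[k]) per distinct want, returning len(wants) minus that cover.
import Mathlib
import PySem

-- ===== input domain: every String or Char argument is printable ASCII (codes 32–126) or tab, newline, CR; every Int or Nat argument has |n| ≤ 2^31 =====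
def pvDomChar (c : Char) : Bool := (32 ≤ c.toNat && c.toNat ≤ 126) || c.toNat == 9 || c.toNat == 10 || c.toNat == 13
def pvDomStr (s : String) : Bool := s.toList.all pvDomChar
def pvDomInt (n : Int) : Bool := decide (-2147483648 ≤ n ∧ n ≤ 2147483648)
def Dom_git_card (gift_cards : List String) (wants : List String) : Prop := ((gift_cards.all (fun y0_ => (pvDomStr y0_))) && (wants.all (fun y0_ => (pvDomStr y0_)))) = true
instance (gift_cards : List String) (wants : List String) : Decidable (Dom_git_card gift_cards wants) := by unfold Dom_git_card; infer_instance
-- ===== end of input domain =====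

-- B replaces A's per-card greedy decrement loop with a per-type multiset-intersection
-- (sum of min(need[k], have[k])); same return value, idiomatic counting formulation.

-- ===== PORT A =====
-- first loop: build dic (count of each want), branching exactly as A does
def gitCardBuild (wants : List String) : PySem.Dict String Int :=
  wants.foldl
    (fun dic thing =>
      if dic.contains thing = false then dic.insert thing 1
      else dic.insert thing (dic.getD thing 0 + 1))
    PySem.Dict.empty

-- second loop: state (dic, result); 'key in dic.keys() and dic[key] > 0'
def gitCardLoop (gift_cards : List String) (st : PySem.Dict String Int × Int) :
    PySem.Dict String Int × Int :=
  gift_cards.foldl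
    (fun st key =>
      if st.1.contains key = true ∧ 0 < st.1.getD key 0 then
        (st.1.insert key (st.1.getD key 0 - 1), st.2 - 1)
      else st)
    st

def git_card (gift_cards : List String) (wants : List String) : Int :=
  (gitCardLoop gift_cards (gitCardBuild wants, (wants.length : Int))).2

-- ===== PORT B =====
def git_card_alt (gift_cards : List String) (wants : List String) : Int :=
  let need : PySem.Dict String Int :=
    wants.foldl (fun d w => d.insert w (d.getD w 0 + 1)) PySem.Dict.empty
  let have_ : PySem.Dict String Int :=
    gift_cards.foldl (fun d g => d.insert g (d.getD g 0 + 1)) PySem.Dict.empty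
  let covered : Int := (need.items.map (fun p => min p.2 (have_.getD p.1 0))).sum
  (wants.length : Int) - covered

-- ===== PRECONDITION & SPEC =====
def Spec_git_card (gift_cards : List String) (wants : List String) (out : Int) : Prop := out = git_card_alt gift_cards wants
instance (gift_cards : List String) (wants : List String) (out : Int) : Decidable (Spec_git_card gift_cards wants out) := by unfold Spec_git_card; infer_instance

-- ===== CLAIM (what is proved, stated in full; the proofs are below) =====
def Claim_equal_git_card : Prop := ∀ (gift_cards : List String) (wants : List String), Dom_git_card gift_cards wants → Spec_git_card gift_cards wants (git_card gift_cards wants)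

-- ===== LEMMAS AND PROOFS =====

-- A's build step equals the plain counter-insert step, so the build IS Counter(wants)
theorem gitCardBuild_eq_counter (wants : List String) :
    gitCardBuild wants = PySem.Dict.counter wants := by
  rw [← PySem.Dict.foldl_insert_getD_add_one_eq_counter]
  unfold gitCardBuild
  congr 1
  funext d t
  by_cases h : d.contains t = false
  · rw [if_pos h, PySem.Dict.getD_of_not_contains d 0 h]; norm_num
  · rw [if_neg h]

-- list-sum congruence: drop 1 at a single distinguished member of a nodup list
theorem sum_map_drop_one {α : Type} [DecidableEq α] (l : List α) (g : α)
    (f1 f2 : α → Int) (hnd : l.Nodup) (hg : g ∈ l)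
    (heq : ∀ k ∈ l, k ≠ g → f1 k = f2 k) (hgg : f1 g = f2 g + 1) :
    (l.map f1).sum = (l.map f2).sum + 1 := by
  induction l with
  | nil => cases hg
  | cons a t ih =>
    simp only [List.map_cons, List.sum_cons]
    rcases List.mem_cons.mp hg with rfl | hgt
    · have : ∀ k ∈ t, f1 k = f2 k := by
        intro k hk
        exact heq k (List.mem_cons_of_mem _ hk) (by rintro rfl; exact (List.nodup_cons.mp hnd).1 hk)
      rw [hgg, List.map_congr_left this]; ring
    · have ha : f1 a = f2 a := heq a (List.mem_cons_self) (by rintro rfl; exact (List.nodup_cons.mp hnd).1 hgt)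
      rw [ha, ih (List.nodup_cons.mp hnd).2 hgt (fun k hk => heq k (List.mem_cons_of_mem _ hk)) ]
      ring

-- sum congruence when counts only differ at a key with nonpositive remaining need
theorem sum_map_congr_mem {α : Type} (l : List α) (f1 f2 : α → Int)
    (h : ∀ k ∈ l, f1 k = f2 k) : (l.map f1).sum = (l.map f2).sum := by
  rw [List.map_congr_left h]

-- MAIN INVARIANT: A's second loop subtracts Σ_{k ∈ keys d} min(d[k], count k gs) from r,
-- provided keys are nodup and all stored needs are ≥ 0.
theorem gitCardLoop_eq (gs : List String) (d : PySem.Dict String Int) (r : Int)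
    (hnd : d.keys.Nodup) (hpos : ∀ k, 0 ≤ d.getD k 0) :
    (gitCardLoop gs (d, r)).2
      = r - (d.keys.map (fun k => min (d.getD k 0) ((gs.count k : Int)))).sum := by
  induction gs generalizing d r with
  | nil =>
    have h0 : ∀ k ∈ d.keys, min (d.getD k 0) (((List.nil (α := String)).count k : Int)) = 0 := by
      intro k _
      have := hpos k
      simp only [List.count_nil, Nat.cast_zero]
      omega
    rw [List.map_congr_left h0]
    simp [gitCardLoop]
  | cons g t ih =>
    unfold gitCardLoop
    simp only [List.foldl_cons]
    by_cases hc : d.contains g = true ∧ 0 < d.getD g 0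
    · rw [if_pos hc]
      have hEq : (List.foldl (fun st key =>
              if st.1.contains key = true ∧ 0 < st.1.getD key 0 then
                (st.1.insert key (st.1.getD key 0 - 1), st.2 - 1)
              else st) (d.insert g (d.getD g 0 - 1), r - 1) t)
          = gitCardLoop t (d.insert g (d.getD g 0 - 1), r - 1) := rfl
      rw [hEq]
      have hk : (d.insert g (d.getD g 0 - 1)).keys = d.keys :=
        PySem.Dict.keys_insert_of_contains d _ hc.1
      have hnd' : (d.insert g (d.getD g 0 - 1)).keys.Nodup := by rw [hk]; exact hnd
      have hpos' : ∀ k, 0 ≤ (d.insert g (d.getD g 0 - 1)).getD k 0 := by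
        intro k
        rw [PySem.Dict.getD_insert]
        split_ifs with h
        · have := hc.2; omega
        · exact hpos k
      rw [ih _ _ hnd' hpos', hk]
      have hgmem : g ∈ d.keys := (PySem.Dict.contains_iff_mem_keys d g).mp hc.1
      have hsum :
          (d.keys.map (fun k => min (d.getD k 0) (((g :: t).count k : Int)))).sum
            = (d.keys.map (fun k =>
                min ((d.insert g (d.getD g 0 - 1)).getD k 0) ((t.count k : Int)))).sum + 1 := by
        apply sum_map_drop_one d.keys g _ _ hnd hgmem
        · intro k _ hkg
          rw [PySem.Dict.getD_insert, if_neg hkg, List.count_cons,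
              if_neg (by simpa using fun h => hkg h.symm)]
          simp
        · rw [PySem.Dict.getD_insert, if_pos rfl, List.count_cons, if_pos (by simp)]
          have h0 : (0:Int) ≤ (t.count g : Int) := by positivity
          have h1 := hc.2
          push_cast
          omega
      rw [hsum]; ring
    · rw [if_neg hc]
      have hEq : (List.foldl (fun st key =>
              if st.1.contains key = true ∧ 0 < st.1.getD key 0 then
                (st.1.insert key (st.1.getD key 0 - 1), st.2 - 1)
              else st) (d, r) t) = gitCardLoop t (d, r) := rfl
      rw [hEq, ih _ _ hnd hpos]
      have hsum :
          (d.keys.map (fun k => min (d.getD k 0) (((g :: t).count k : Int)))).sum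
            = (d.keys.map (fun k => min (d.getD k 0) ((t.count k : Int)))).sum := by
        apply sum_map_congr_mem
        intro k hk
        by_cases hkg : k = g
        · subst hkg
          have hcont : d.contains k = true := (PySem.Dict.contains_iff_mem_keys d k).mpr hk
          have hle : d.getD k 0 ≤ 0 := by
            by_contra h
            exact hc ⟨hcont, by omega⟩
          have h0 : (0:Int) ≤ (t.count k : Int) := by positivity
          have h1 : (0:Int) ≤ (((k :: t).count k : Int)) := by positivity
          omega
        · rw [List.count_cons, if_neg (by simpa using fun h => hkg h.symm)]
          simp
      rw [hsum]

-- B's covered sum, written over keys of Counter(wants), with have-lookups as counts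
theorem git_card_alt_eq (gift_cards wants : List String) :
    git_card_alt gift_cards wants
      = (wants.length : Int)
        - ((PySem.Dict.counter wants).keys.map
            (fun k => min ((wants.count k : Int)) ((gift_cards.count k : Int)))).sum := by
  unfold git_card_alt
  simp only [PySem.Dict.foldl_insert_getD_add_one_eq_counter]
  congr 1
  rw [PySem.Dict.items_counter, ← PySem.Dict.keys_counter, List.map_map]
  apply sum_map_congr_mem
  intro k _
  simp [PySem.Dict.getD_counter]

-- ===== VERDICT (by name: the statement is the Claim_ definition above) =====
theorem git_card_spec : Claim_equal_git_card := by
  intro gift_cards wants _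
  unfold Spec_git_card
  unfold git_card
  rw [gitCardBuild_eq_counter]
  rw [gitCardLoop_eq gift_cards (PySem.Dict.counter wants) (wants.length : Int)
        (PySem.Dict.nodup_keys_counter wants)
        (fun k => by rw [PySem.Dict.getD_counter]; positivity)]
  rw [git_card_alt_eq]
  congr 1
  apply sum_map_congr_mem
  intro k _
  rw [PySem.Dict.getD_counter]
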